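-- pv_equiv track=rewrite | github.com/aguinane/Cooklang | cooklang/parser.py | find_cookware
-- ===== SOURCE A (Python) =====
-- def find_cookware(step: str) -> list[dict[str, str]]:
--     """Find cookware items in a recipe step"""
--     cookwares = []
--     item = ""
--     matching: bool = False
--     for x in step:
--         if x == "#":
--             matching = True
--         if matching and x == "@":
--             if " " in item:
--                 item = item.split(" ")[0]
--             elif "." in item:
--                 item = item.split(".")[0]
--             cookwares.append(item)
--             matching = False
--             item = ""
--         if matching and x == "}":
--             item += x
--             cookwares.append(item)
--             matching = False
--             item = ""
--         if matching:
--             item += x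
--
--     if matching:
--         if " " in item:
--             item = item.split(" ")[0]
--         elif "." in item:
--             item = item.split(".")[0]
--         cookwares.append(item)
--     return cookwares
-- ===== SOURCE B (Python) =====
-- def find_cookware(step: str) -> list[dict[str, str]]:
--     """Find cookware items in a recipe step (delimiter-search re-implementation)."""
--
--     def _trunc(token: str) -> str:
--         if " " in token:
--             return token.split(" ")[0]
--         if "." in token:
--             return token.split(".")[0]
--         return token
--
--     cookwares = []
--     i = 0
--     while True:
--         h = step.find("#", i)
--         if h == -1:
--             break
--         a = step.find("@", h)
--         b = step.find("}", h)
--         if a == -1 and b == -1: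
--             cookwares.append(_trunc(step[h:]))
--             break
--         if b == -1 or (a != -1 and a < b):
--             cookwares.append(_trunc(step[h:a]))
--             i = a + 1
--         else:
--             cookwares.append(step[h:b + 1])
--             i = b + 1
--     return cookwares
-- ===== Notes on version B (the rewrite author's own statement) =====
-- stated objective: faster
-- what changed: Replaced A's per-character boolean state machine (matching flag plus a character-by-character growing item buffer with repeated membership/split scans) by a delimiter-search loop that jumps straight from one marker to the next token terminator using str.find.
import Mathlib
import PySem

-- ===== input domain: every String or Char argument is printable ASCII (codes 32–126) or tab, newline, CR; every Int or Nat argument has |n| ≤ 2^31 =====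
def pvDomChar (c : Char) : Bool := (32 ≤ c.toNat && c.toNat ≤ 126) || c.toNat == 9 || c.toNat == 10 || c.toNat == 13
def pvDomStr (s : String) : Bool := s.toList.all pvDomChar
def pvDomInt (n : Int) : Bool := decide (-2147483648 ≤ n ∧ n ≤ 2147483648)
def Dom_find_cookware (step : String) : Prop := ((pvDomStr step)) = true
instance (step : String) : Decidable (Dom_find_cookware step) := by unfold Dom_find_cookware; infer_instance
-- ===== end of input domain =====

-- B replaces A's per-character boolean state machine by a delimiter-search loop
-- (find '#', then cut at the earliest of '@'/'}'), for a plainer decomposition; same return value.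

-- ===== PORT A =====
-- A's truncation: split(" ")[0] if " " in item else split(".")[0] if "." in item
def pvTruncA (item : List Char) : List Char :=
  if item.contains ' ' then item.takeWhile (· ≠ ' ')
  else if item.contains '.' then item.takeWhile (· ≠ '.')
  else item

-- one iteration of A's `for x in step` body; state = (cookwares, item, matching)
def pvStepA (st : List (List Char) × List Char × Bool) (x : Char) :
    List (List Char) × List Char × Bool :=
  let (cw, item, m) := st
  let m := if x = '#' then true else m
  if m ∧ x = '@' then (cw ++ [pvTruncA item], [], false)
  else if m ∧ x = '}' then (cw ++ [item ++ ['}']], [], false)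
  else if m then (cw, item ++ [x], true)
  else (cw, item, m)

-- A's trailing `if matching:` block
def pvFinishA (st : List (List Char) × List Char × Bool) : List (List Char) :=
  let (cw, item, m) := st
  if m then cw ++ [pvTruncA item] else cw

def find_cookware (step : String) : List String :=
  (pvFinishA (step.toList.foldl pvStepA ([], [], false))).map String.ofList

-- ===== PORT B =====
def pvTruncB (token : List Char) : List Char :=
  if token.contains ' ' then token.takeWhile (· ≠ ' ')
  else if token.contains '.' then token.takeWhile (· ≠ '.')
  else token

-- B's while-loop: `step.find('#', i)` is the list-side dropWhile to the next '#';
-- the earliest of `step.find('@', h)` / `step.find('}', h)` is the span up to the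
-- first '@' or '}'; slices step[h:pos] / step[h:pos+1] are the spanned segment.
def pvLoopB (l : List Char) : List (List Char) :=
  match hd : l.dropWhile (fun c => !(c = '#')) with
  | [] => []
  | c :: rest =>
    let mid := rest.takeWhile (fun c => !(c = '@' ∨ c = '}'))
    match hr : rest.dropWhile (fun c => !(c = '@' ∨ c = '}')) with
    | [] => [pvTruncB (c :: mid)]
    | d :: r2 =>
      if d = '@' then pvTruncB (c :: mid) :: pvLoopB r2
      else (c :: (mid ++ ['}'])) :: pvLoopB r2
termination_by l.length
decreasing_by
  all_goals
    have h1 : (l.dropWhile (fun c => !(c = '#'))).length ≤ l.length :=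
      List.length_dropWhile_le _ l
    have h2 : (rest.dropWhile (fun c => !(c = '@' ∨ c = '}'))).length ≤ rest.length :=
      List.length_dropWhile_le _ rest
    rw [hd] at h1; rw [hr] at h2; simp at h1 h2; omega

def find_cookware_alt (step : String) : List String :=
  (pvLoopB step.toList).map String.ofList

-- ===== PRECONDITION & SPEC =====
def Spec_find_cookware (step : String) (out : List String) : Prop := out = find_cookware_alt step
instance (step : String) (out : List String) : Decidable (Spec_find_cookware step out) := by unfold Spec_find_cookware; infer_instance

-- ===== CLAIM (what is proved, stated in full; the proofs are below) =====
def Claim_equal_find_cookware : Prop := ∀ (step : String), Dom_find_cookware step → Spec_find_cookware step (find_cookware step)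

-- ===== LEMMAS AND PROOFS =====

-- the first element a dropWhile stops at falsifies the predicate
lemma pv_dropWhile_head (p : Char → Bool) : ∀ (l : List Char) {c : Char} {t : List Char},
    l.dropWhile p = c :: t → p c = false := by
  intro l
  induction l with
  | nil => intro c t h; simp at h
  | cons a l ih =>
    intro c t h
    by_cases hp : p a
    · rw [List.dropWhile_cons_of_pos hp] at h; exact ih h
    · rw [List.dropWhile_cons_of_neg hp] at h
      cases h; simpa using hp

-- while not matching, A's loop body ignores every non-'#' character
lemma pv_skipA (t : List Char) : ∀ (cw : List (List Char)),
    (∀ c ∈ t, ¬ c = '#') →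
    t.foldl pvStepA (cw, [], false) = (cw, [], false) := by
  induction t with
  | nil => intro cw _; rfl
  | cons c t ih =>
    intro cw h
    have hc : ¬ c = '#' := h c (by simp)
    simp only [List.foldl_cons]
    have hs : pvStepA (cw, [], false) c = (cw, [], false) := by
      simp [pvStepA, hc]
    rw [hs]
    exact ih cw (fun c hc' => h c (by simp [hc']))

-- while matching, A's loop body appends every non-'@'/'}' character to item
lemma pv_growA (t : List Char) : ∀ (cw : List (List Char)) (item : List Char),
    (∀ c ∈ t, ¬ (c = '@' ∨ c = '}')) →
    t.foldl pvStepA (cw, item, true) = (cw, item ++ t, true) := by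
  induction t with
  | nil => simp
  | cons c t ih =>
    intro cw item h
    have hc : ¬ (c = '@' ∨ c = '}') := h c (by simp)
    have hca : ¬ c = '@' := fun hx => hc (Or.inl hx)
    have hcb : ¬ c = '}' := fun hx => hc (Or.inr hx)
    simp only [List.foldl_cons]
    have hs : pvStepA (cw, item, true) c = (cw, item ++ [c], true) := by
      simp [pvStepA, hca, hcb]
    rw [hs, ih cw (item ++ [c]) (fun c hc' => h c (by simp [hc']))]
    simp

-- the main invariant: A's fold from the idle state computes B's loop
lemma pv_main : ∀ (n : Nat) (l : List Char), l.length ≤ n → ∀ (cw : List (List Char)),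
    pvFinishA (l.foldl pvStepA (cw, [], false)) = cw ++ pvLoopB l := by
  intro n
  induction n with
  | zero =>
    intro l hl cw
    have : l = [] := List.eq_nil_of_length_eq_zero (Nat.le_zero.mp hl)
    subst this; simp [pvLoopB, pvFinishA]
  | succ n ih =>
    intro l hl cw
    have hsplit := List.takeWhile_append_dropWhile (p := fun c => !(c = '#')) (l := l)
    rcases hd : l.dropWhile (fun c => !(c = '#')) with _ | ⟨c, rest⟩
    · -- no '#' left: the fold never starts matching
      rw [pvLoopB, hd]
      rw [← hsplit, hd, List.append_nil]
      rw [pv_skipA _ cw (fun c hc => by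
        have := List.mem_takeWhile_imp hc; simpa using this)]
      simp [pvFinishA]
    · -- a '#' at position c: A enters matching, B starts a token
      have hc : c = '#' := by
        have := pv_dropWhile_head (fun c => !(c = '#')) l hd
        simpa using this
      subst hc
      rw [pvLoopB, hd]
      rw [← hsplit, hd, List.foldl_append]
      rw [pv_skipA _ cw (fun c hc => by
        have := List.mem_takeWhile_imp hc; simpa using this)]
      simp only [List.foldl_cons]
      rw [show pvStepA (cw, [], false) '#' = (cw, ['#'], true) by simp [pvStepA]]
      -- split the rest at the first '@' or '}'
      have hsplit2 := List.takeWhile_append_dropWhile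
        (p := fun c => !(c = '@' ∨ c = '}')) (l := rest)
      have hmidok : ∀ c ∈ rest.takeWhile (fun c => !(c = '@' ∨ c = '}')),
          ¬ (c = '@' ∨ c = '}') := fun c hc => by
        have := List.mem_takeWhile_imp hc; simpa using this
      have hlen1 : rest.length < l.length := by
        have h1 : (l.dropWhile (fun c => !(c = '#'))).length ≤ l.length :=
          List.length_dropWhile_le _ l
        rw [hd] at h1; simp at h1; omega
      rcases hr : rest.dropWhile (fun c => !(c = '@' ∨ c = '}')) with _ | ⟨d, r2⟩
      · -- token runs to the end of the string
        rw [show rest.foldl pvStepA (cw, ['#'], true)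
            = (cw, '#' :: rest.takeWhile (fun c => !(c = '@' ∨ c = '}')), true) from by
          conv_lhs => rw [← hsplit2, hr, List.append_nil]
          exact pv_growA _ cw ['#'] hmidok]
        simp [pvFinishA, pvTruncA, pvTruncB]
      · -- token ends at d ∈ {'@', '}'}
        have hdmem : d = '@' ∨ d = '}' := by
          have := pv_dropWhile_head (fun c => !(c = '@' ∨ c = '}')) rest hr
          simp at this; tauto
        rw [show rest.foldl pvStepA (cw, ['#'], true)
            = (d :: r2).foldl pvStepA (cw, '#' :: rest.takeWhile (fun c => !(c = '@' ∨ c = '}')), true) from by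
          conv_lhs => rw [← hsplit2, hr]
          rw [List.foldl_append, pv_growA _ cw ['#'] hmidok]
          simp]
        simp only [List.foldl_cons]
        have hlen2 : r2.length < rest.length := by
          have h2 : (rest.dropWhile (fun c => !(c = '@' ∨ c = '}'))).length ≤ rest.length :=
            List.length_dropWhile_le _ rest
          rw [hr] at h2; simp at h2; omega
        have hr2 : r2.length ≤ n := by omega
        rcases hdmem with hda | hdb
        · subst hda
          rw [show pvStepA (cw, '#' :: rest.takeWhile (fun c => !(c = '@' ∨ c = '}')), true) '@'
              = (cw ++ [pvTruncA ('#' :: rest.takeWhile (fun c => !(c = '@' ∨ c = '}')))], [], false) from by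
            simp [pvStepA]]
          rw [ih r2 hr2]
          simp [pvTruncA, pvTruncB]
        · subst hdb
          rw [show pvStepA (cw, '#' :: rest.takeWhile (fun c => !(c = '@' ∨ c = '}')), true) '}'
              = (cw ++ [('#' :: rest.takeWhile (fun c => !(c = '@' ∨ c = '}'))) ++ ['}']], [], false) from by
            simp [pvStepA]]
          rw [ih r2 hr2]
          simp

-- ===== VERDICT (by name: the statement is the Claim_ definition above) =====
theorem find_cookware_spec : Claim_equal_find_cookware := by
  intro step _
  unfold Spec_find_cookware find_cookware find_cookware_alt
  rw [pv_main step.toList.length step.toList (le_refl _) []]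
  simp
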